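-- pv_equiv track=rewrite | github.com/Jackanoree/EnvyhubsWebsite | scripts/download_shopify_images_Gold_Silver_Blue.py | windows_safe_filename
-- ===== SOURCE A (Python) =====
-- def windows_safe_filename(name: str) -> str:
--     bad = '<>:"/\\|?*'
--     for ch in bad:
--         name = name.replace(ch, "-")
--     name = name.strip().strip(".")
--     if name == "":
--         name = "file"
--     return name
-- ===== SOURCE B (Python) =====
-- def windows_safe_filename(name: str) -> str:
--     bad = '<>:"/\\|?*'
--     out = []
--     for ch in name:
--         out.append("-" if ch in bad else ch)
--     while out and out[0].isspace():
--         del out[0]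
--     while out and out[-1].isspace():
--         out.pop()
--     while out and out[0] == ".":
--         del out[0]
--     while out and out[-1] == ".":
--         out.pop()
--     return "".join(out) if out else "file"
-- ===== Notes on version B (the rewrite author's own statement) =====
-- stated objective: alternative
-- what changed: B builds the sanitized body with a single accumulator loop over the characters and then trims each end with explicit pop-style while loops (whitespace front and back, then dot characters front and back), instead of A's nine full-string replace passes followed by the two library strip calls.
import Mathlib
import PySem

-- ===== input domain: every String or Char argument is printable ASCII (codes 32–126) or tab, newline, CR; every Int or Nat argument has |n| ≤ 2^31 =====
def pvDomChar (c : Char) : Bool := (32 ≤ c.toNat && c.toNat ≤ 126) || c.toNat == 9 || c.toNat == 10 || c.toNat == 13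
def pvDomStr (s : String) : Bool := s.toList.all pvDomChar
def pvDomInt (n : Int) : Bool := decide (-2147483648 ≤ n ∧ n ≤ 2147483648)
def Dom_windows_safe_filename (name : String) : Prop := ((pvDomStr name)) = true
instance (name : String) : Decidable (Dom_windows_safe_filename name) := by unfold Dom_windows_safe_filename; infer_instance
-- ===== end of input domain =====

-- B builds the body with an append loop and trims each end with explicit pop-while loops,
-- instead of A's nine full-string replace passes followed by the library strip/stripChars (alternative decomposition).

-- ===== PORT A =====
def windows_safe_filename (name : String) : String :=
  let bad : String := "<>:\"/\\|?*"
  let name := bad.toList.foldl (fun s ch => PySem.Str.replace s (String.singleton ch) "-") name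
  let name := PySem.Str.stripChars (PySem.Str.strip name) "."
  if name = "" then "file" else name

-- ===== PORT B =====
-- while out and p(out[0]): del out[0]
def pvTrimFront (p : Char → Bool) : List Char → List Char
  | [] => []
  | c :: rest => if p c then pvTrimFront p rest else c :: rest

-- while out and p(out[-1]): out.pop()
def pvTrimBack (p : Char → Bool) (l : List Char) : List Char :=
  match h : l.getLast? with
  | none => l
  | some c => if p c then pvTrimBack p l.dropLast else l
  termination_by l.length
  decreasing_by
    cases l with
    | nil => simp at h
    | cons a t => simp

def windows_safe_filename_alt (name : String) : String :=
  let bad : List Char := "<>:\"/\\|?*".toList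
  let out := name.toList.foldl (fun out ch => out ++ [if bad.contains ch then '-' else ch]) []
  let out := pvTrimFront PySem.Chars.isspace out
  let out := pvTrimBack PySem.Chars.isspace out
  let out := pvTrimFront (fun c => c == '.') out
  let out := pvTrimBack (fun c => c == '.') out
  if out.isEmpty then "file" else String.ofList out

-- ===== PRECONDITION & SPEC =====
def Spec_windows_safe_filename (name : String) (out : String) : Prop := out = windows_safe_filename_alt name
instance (name : String) (out : String) : Decidable (Spec_windows_safe_filename name out) := by unfold Spec_windows_safe_filename; infer_instance

-- ===== CLAIM (what is proved, stated in full; the proofs are below) =====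
def Claim_equal_windows_safe_filename : Prop := ∀ (name : String), Dom_windows_safe_filename name → Spec_windows_safe_filename name (windows_safe_filename name)

-- ===== LEMMAS AND PROOFS =====

theorem replace_go_single (c : Char) (fuel : Nat) (l acc : List Char)
    (h : l.length ≤ fuel) :
    PySem.Chars.replace.go [c] ['-'] fuel l acc
      = acc.reverse ++ l.map (fun x => if x = c then '-' else x) := by
  induction fuel generalizing l acc with
  | zero =>
    interval_cases hl : l.length
    · simp at hl; subst hl; simp [PySem.Chars.replace.go]
  | succ n ih =>
    cases l with
    | nil => simp [PySem.Chars.replace.go]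
    | cons a t =>
      simp only [PySem.Chars.replace.go]
      by_cases hac : a = c
      · subst hac
        have hp : List.isPrefixOf [a] (a :: t) = true := by
          simp [List.isPrefixOf]
        rw [if_pos hp]
        rw [show List.drop [a].length (a :: t) = t from rfl]
        simp only [List.length_cons] at h
        rw [ih _ _ (by omega)]
        simp
      · have hp : List.isPrefixOf [c] (a :: t) = false := by
          simp [List.isPrefixOf]; exact fun hh => absurd hh.symm hac
        rw [if_neg (by simp [hp])]
        simp only [List.length_cons] at h
        rw [ih _ _ (by omega)]
        simp [hac]

theorem replace_single (c : Char) (l : List Char) :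
    PySem.Chars.replace l [c] ['-'] = l.map (fun x => if x = c then '-' else x) := by
  simp [PySem.Chars.replace, replace_go_single c l.length l [] (le_refl _)]

theorem fold_replace_eq_map (cs : List Char) (s : String) :
    (cs.foldl (fun s ch => PySem.Str.replace s (String.singleton ch) "-") s).toList
      = s.toList.map (fun x => if cs.contains x then '-' else x) := by
  induction cs generalizing s with
  | nil => simp
  | cons c cs ih =>
    simp only [List.foldl_cons]
    rw [ih, PySem.Str.toList_replace]
    have : (String.singleton c).toList = [c] := by simp [String.singleton]
    rw [this]
    rw [show ("-" : String).toList = ['-'] from rfl]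
    rw [replace_single, List.map_map]
    apply List.map_congr_left
    intro x _
    by_cases hxc : x = c
    · subst hxc; simp
    · simp [Function.comp, hxc]

theorem trimFront_eq_dropWhile (p : Char → Bool) (l : List Char) :
    pvTrimFront p l = l.dropWhile p := by
  induction l with
  | nil => rfl
  | cons c t ih =>
    simp only [pvTrimFront, List.dropWhile]
    by_cases hc : p c = true
    · simp [hc, ih]
    · simp [hc]

theorem trimBack_eq (p : Char → Bool) (l : List Char) :
    pvTrimBack p l = (l.reverse.dropWhile p).reverse := by
  induction l using List.reverseRecOn with
  | nil => rw [pvTrimBack]; rfl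
  | append_singleton xs c ih =>
    rw [pvTrimBack]
    split
    · next h => simp at h
    · next c2 h =>
      rw [List.getLast?_concat] at h
      injection h with h'
      subst h'
      rw [List.dropLast_concat]
      by_cases hc : p c = true
      · simp [hc, ih]
      · simp [hc]

theorem windows_safe_filename_eq (name : String) :
    windows_safe_filename name = windows_safe_filename_alt name := by
  unfold windows_safe_filename windows_safe_filename_alt
  simp only [PySem.List.foldl_append_singleton_eq_map, List.nil_append]
  rw [trimFront_eq_dropWhile, trimFront_eq_dropWhile, trimBack_eq, trimBack_eq]
  have hA : (("<>:\"/\\|?*".toList).foldl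
      (fun s ch => PySem.Str.replace s (String.singleton ch) "-") name)
      = String.ofList (name.toList.map
          (fun ch => if ("<>:\"/\\|?*".toList).contains ch then '-' else ch)) := by
    calc _ = String.ofList (("<>:\"/\\|?*".toList).foldl
            (fun s ch => PySem.Str.replace s (String.singleton ch) "-") name).toList :=
          String.ofList_toList.symm
      _ = _ := by rw [fold_replace_eq_map]
  rw [hA]
  have hp : (fun c => List.contains (".".toList) c) = (fun c => c == '.') := by
    funext c
    show List.contains ['.'] c = (c == '.')
    simp only [List.contains, List.elem]
    cases c == '.' <;> rfl
  set L := name.toList.map (fun ch => if ("<>:\"/\\|?*".toList).contains ch then '-' else ch) with hL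
  set out4 := (List.dropWhile (fun c => c == '.')
      ((List.dropWhile (fun c => c == '.')
        ((List.dropWhile PySem.Chars.isspace
          ((List.dropWhile PySem.Chars.isspace L).reverse)).reverse)).reverse)).reverse with hout
  have hS : (PySem.Str.stripChars (PySem.Str.strip (String.ofList L)) ".").toList = out4 := by
    rw [hout]
    simp only [PySem.Str.toList_stripChars, PySem.Str.toList_strip, PySem.Chars.strip,
      PySem.Chars.lstrip, PySem.Chars.rstrip, PySem.Chars.stripChars, hp, String.toList_ofList]
  have hSeq : PySem.Str.stripChars (PySem.Str.strip (String.ofList L)) "." = String.ofList out4 := by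
    rw [← hS, String.ofList_toList]
  rw [hSeq]
  by_cases hE : out4 = []
  · rw [hE]; simp
  · rw [if_neg (fun hh => hE (String.ofList_eq_empty_iff.mp hh)),
        if_neg (fun hh => hE (List.isEmpty_iff.mp hh))]

-- ===== VERDICT (by name: the statement is the Claim_ definition above) =====
theorem windows_safe_filename_spec : Claim_equal_windows_safe_filename := by
  intro name _
  unfold Spec_windows_safe_filename
  exact windows_safe_filename_eq name
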